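-- pv_equiv track=rewrite | github.com/AmitVaranasi/MetaAgent | src/meta_agent/linkedin_outreach/wake_detector.py | _is_wake_event
-- ===== SOURCE A (Python) =====
-- def _is_wake_event(log_line: str) -> bool:
--     """Determine if a log line represents a wake event.
--
--     Args:
--         log_line: A line from the system log
--
--     Returns:
--         True if this is a wake event, False otherwise
--     """
--     # Look for common wake indicators
--     wake_indicators = [
--         "Wake reason",
--         "DarkWake",
--         "wake",  # Generic wake message
--     ]
--
--     line_lower = log_line.lower()
--
--     # Check for wake indicators
--     for indicator in wake_indicators:
--         if indicator.lower() in line_lower: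
--             # Additional filtering to avoid false positives
--             # Exclude maintenance wakes or network wakes that don't involve user interaction
--             if "maintenance" in line_lower:
--                 continue
--             return True
--
--     return False
-- ===== SOURCE B (Python) =====
-- def _is_wake_event(log_line: str) -> bool:
--     line = log_line.lower()
--     return "wake" in line and "maintenance" not in line
-- ===== Notes on version B (the rewrite author's own statement) =====
-- stated objective: simpler
-- what changed: Drops the indicator list and loop: every lowered indicator contains the generic wake keyword as a substring, so B lowers the line once and returns a single conjunction of one presence test and one maintenance-exclusion test.
import Mathlib
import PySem

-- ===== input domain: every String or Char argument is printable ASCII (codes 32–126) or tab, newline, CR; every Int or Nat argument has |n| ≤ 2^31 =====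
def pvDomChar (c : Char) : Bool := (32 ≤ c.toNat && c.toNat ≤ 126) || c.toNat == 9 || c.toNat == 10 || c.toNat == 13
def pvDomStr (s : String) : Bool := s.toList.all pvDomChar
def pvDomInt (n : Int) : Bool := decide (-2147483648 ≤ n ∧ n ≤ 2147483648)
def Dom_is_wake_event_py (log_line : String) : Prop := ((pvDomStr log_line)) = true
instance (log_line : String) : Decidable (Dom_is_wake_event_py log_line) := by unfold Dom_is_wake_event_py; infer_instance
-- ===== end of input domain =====

-- B replaces A's indicator list and loop by one conjunction: every lowered indicator contains the generic
-- wake keyword, so A collapses to one presence test plus one maintenance-exclusion test (objective: simpler).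

-- ===== PORT A =====
-- the 'for indicator in wake_indicators' loop, with 'continue' as recursion on the rest
def wakeLoopA (line_lower : String) : List String → Bool
  | [] => false
  | ind :: rest =>
      if PySem.Str.isIn (PySem.Str.lower ind) line_lower then
        if PySem.Str.isIn "maintenance" line_lower then wakeLoopA line_lower rest
        else true
      else wakeLoopA line_lower rest

def is_wake_event_py (log_line : String) : Bool :=
  let wake_indicators : List String := ["Wake reason", "DarkWake", "wake"]
  let line_lower := PySem.Str.lower log_line
  wakeLoopA line_lower wake_indicators

-- ===== PORT B =====
def is_wake_event_py_alt (log_line : String) : Bool :=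
  let line := PySem.Str.lower log_line
  PySem.Str.isIn "wake" line && !(PySem.Str.isIn "maintenance" line)

-- ===== PRECONDITION & SPEC =====
def Spec_is_wake_event_py (log_line : String) (out : Bool) : Prop := out = is_wake_event_py_alt log_line
instance (log_line : String) (out : Bool) : Decidable (Spec_is_wake_event_py log_line out) := by unfold Spec_is_wake_event_py; infer_instance

-- ===== CLAIM (what is proved, stated in full; the proofs are below) =====
def Claim_equal_is_wake_event_py : Prop := ∀ (log_line : String), Dom_is_wake_event_py log_line → Spec_is_wake_event_py log_line (is_wake_event_py log_line)

-- ===== LEMMAS AND PROOFS =====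

-- if a longer indicator is present, so is its infix "wake"
theorem chars_wake_of_isIn (sub : String) (l : List Char) (h : PySem.Chars.isIn sub.toList l = true)
    (hw : ("wake".toList : List Char) <:+: sub.toList) :
    PySem.Chars.isIn "wake".toList l = true := by
  rw [PySem.Chars.isIn_iff_infix] at h ⊢
  exact hw.trans h

-- ===== VERDICT (by name: the statement is the Claim_ definition above) =====
theorem is_wake_event_py_spec : Claim_equal_is_wake_event_py := by
  intro log_line _
  unfold Spec_is_wake_event_py is_wake_event_py is_wake_event_py_alt
  set L := PySem.Str.lower log_line with hL
  show wakeLoopA L ["Wake reason", "DarkWake", "wake"] =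
    (PySem.Str.isIn "wake" L && !(PySem.Str.isIn "maintenance" L))
  have h1 : PySem.Str.lower "Wake reason" = "wake reason" := by decide
  have h2 : PySem.Str.lower "DarkWake" = "darkwake" := by decide
  have h3 : PySem.Str.lower "wake" = "wake" := by decide
  simp only [wakeLoopA, h1, h2, h3, PySem.Str.isIn_eq]
  by_cases hm : PySem.Chars.isIn "maintenance".toList L.toList = true
  · simp only [String.toList] at hm ⊢
    simp [hm]
  · simp only [Bool.not_eq_true] at hm
    simp only [String.toList] at hm ⊢
    simp only [hm, Bool.not_false, Bool.and_true]
    by_cases hwr : PySem.Chars.isIn "wake reason".toList L.toList = true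
    · have hwk := chars_wake_of_isIn "wake reason" L.toList hwr (by decide)
      simp only [String.toList] at hwr hwk
      simp [hwr, hwk]
    · by_cases hdw : PySem.Chars.isIn "darkwake".toList L.toList = true
      · have hwk := chars_wake_of_isIn "darkwake" L.toList hdw (by decide)
        simp only [Bool.not_eq_true] at hwr
        simp only [String.toList] at hwr hdw hwk
        simp [hwr, hdw, hwk]
      · simp only [Bool.not_eq_true] at hwr hdw
        simp only [String.toList] at hwr hdw
        simp [hwr, hdw]
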